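-- pv_equiv track=rewrite | github.com/Hiveagents-ones/HiveCore | src/agentscope/scripts/_validation.py | _filter_source_files
-- ===== SOURCE A (Python) =====
-- def _filter_source_files(files: dict[str, str]) -> dict[str, str]:
--     """Filter out third-party and generated files from file dict.
--
--     Args:
--         files: Dict mapping file paths to content
--
--     Returns:
--         dict: Filtered dict with only source files
--     """
--     excluded_patterns = [
--         "node_modules/",
--         "__pycache__/",
--         ".git/",
--         "dist/",
--         "build/",
--         ".venv/",
--         "venv/",
--         ".env/",
--         "env/",
--         ".pytest_cache/",
--         ".mypy_cache/",
--         ".tox/",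
--         "egg-info/",
--         ".eggs/",
--         "htmlcov/",
--         ".coverage",
--         "coverage.xml",
--         "*.pyc",
--         "*.pyo",
--         "*.egg",
--         "*.whl",
--         "package-lock.json",
--         "yarn.lock",
--         "pnpm-lock.yaml",
--     ]
--
--     filtered = {}
--     for fpath, content in files.items():
--         # Skip excluded patterns
--         skip = False
--         for pattern in excluded_patterns:
--             if pattern.endswith("/"):
--                 if pattern[:-1] in fpath:
--                     skip = True
--                     break
--             elif pattern.startswith("*."):
--                 if fpath.endswith(pattern[1:]):
--                     skip = True
--                     break
--             elif pattern in fpath: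
--                 skip = True
--                 break
--
--         if not skip:
--             filtered[fpath] = content
--
--     return filtered
-- ===== SOURCE B (Python) =====
-- def _filter_source_files(files: dict[str, str]) -> dict[str, str]:
--     """Filter out third-party and generated files from file dict.
--
--     Sieve formulation: instead of testing every pattern against each file,
--     iterate over the fixed pattern list and let each pattern remove its
--     matching files from the remaining set in one pass.  Correct because a
--     file is excluded iff SOME pattern matches it, so successive removal
--     passes leave exactly the files no pattern matches, in original order.
--     """
--     excluded_patterns = [
--         "node_modules/",
--         "__pycache__/",
--         ".git/",
--         "dist/",
--         "build/",
--         ".venv/",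
--         "venv/",
--         ".env/",
--         "env/",
--         ".pytest_cache/",
--         ".mypy_cache/",
--         ".tox/",
--         "egg-info/",
--         ".eggs/",
--         "htmlcov/",
--         ".coverage",
--         "coverage.xml",
--         "*.pyc",
--         "*.pyo",
--         "*.egg",
--         "*.whl",
--         "package-lock.json",
--         "yarn.lock",
--         "pnpm-lock.yaml",
--     ]
--
--     remaining = dict(files)
--     for pattern in excluded_patterns:
--         if pattern.endswith("/"):
--             needle = pattern[:-1]
--             remaining = {f: c for f, c in remaining.items() if needle not in f}
--         elif pattern.startswith("*."):
--             suffix = pattern[1:]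
--             remaining = {f: c for f, c in remaining.items()
--                          if not f.endswith(suffix)}
--         else:
--             remaining = {f: c for f, c in remaining.items()
--                          if pattern not in f}
--     return remaining
-- ===== Notes on version B (the rewrite author's own statement) =====
-- stated objective: alternative
-- what changed: B replaces A's file-major single pass (per-file inner loop over all 24 patterns with a skip flag and break) by a pattern-major sieve: it loops over the fixed pattern list and each pattern removes its matching files from the remaining dict in its own filtering pass, so the result is the files no pattern matches; no per-file pattern dispatch, flag or break remains.
import Mathlib
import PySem

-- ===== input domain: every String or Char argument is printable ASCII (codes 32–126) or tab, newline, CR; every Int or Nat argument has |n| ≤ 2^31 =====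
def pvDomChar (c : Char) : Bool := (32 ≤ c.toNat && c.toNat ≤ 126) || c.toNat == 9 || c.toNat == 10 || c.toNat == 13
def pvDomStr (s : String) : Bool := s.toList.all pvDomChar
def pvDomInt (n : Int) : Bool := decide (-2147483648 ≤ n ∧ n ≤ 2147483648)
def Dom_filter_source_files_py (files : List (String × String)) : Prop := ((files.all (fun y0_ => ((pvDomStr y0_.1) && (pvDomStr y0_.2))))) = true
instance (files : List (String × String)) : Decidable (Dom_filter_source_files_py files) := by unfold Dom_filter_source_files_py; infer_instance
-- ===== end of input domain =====

-- B is a pattern-major sieve (each pattern removes its matching files from the remaining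
-- dict in its own pass) instead of A's per-file pattern loop with break; same return value.

-- ===== PORT A =====
def pvExcludedPatterns : List String :=
  ["node_modules/", "__pycache__/", ".git/", "dist/", "build/", ".venv/", "venv/",
   ".env/", "env/", ".pytest_cache/", ".mypy_cache/", ".tox/", "egg-info/", ".eggs/",
   "htmlcov/", ".coverage", "coverage.xml", "*.pyc", "*.pyo", "*.egg", "*.whl",
   "package-lock.json", "yarn.lock", "pnpm-lock.yaml"]

-- A's inner 'for pattern in excluded_patterns: … break' loop computing 'skip'
def pvSkipA (fpath : String) : List String → Bool
  | [] => false
  | pattern :: rest =>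
    if PySem.Str.endswith pattern "/" then
      if PySem.Str.isIn (PySem.Str.slice pattern none (some (-1))) fpath then true
      else pvSkipA fpath rest
    else if PySem.Str.startswith pattern "*." then
      if PySem.Str.endswith fpath (PySem.Str.slice pattern (some 1) none) then true
      else pvSkipA fpath rest
    else if PySem.Str.isIn pattern fpath then true
    else pvSkipA fpath rest

def filter_source_files_py (files : List (String × String)) : List (String × String) :=
  (files.foldl
    (fun (filtered : PySem.Dict String String) fc =>
      if pvSkipA fc.1 pvExcludedPatterns then filtered else filtered.insert fc.1 fc.2)
    PySem.Dict.empty).items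

-- ===== PORT B =====
-- Source B: remaining = dict(files); then one filtering pass per pattern
def filter_source_files_py_alt (files : List (String × String)) : List (String × String) :=
  let remaining0 :=
    (files.foldl (fun (d : PySem.Dict String String) fc => d.insert fc.1 fc.2)
      PySem.Dict.empty).items
  pvExcludedPatterns.foldl
    (fun rem pattern =>
      if PySem.Str.endswith pattern "/" then
        let needle := PySem.Str.slice pattern none (some (-1))
        rem.filter (fun fc => !PySem.Str.isIn needle fc.1)
      else if PySem.Str.startswith pattern "*." then
        let suffix := PySem.Str.slice pattern (some 1) none
        rem.filter (fun fc => !PySem.Str.endswith fc.1 suffix)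
      else rem.filter (fun fc => !PySem.Str.isIn pattern fc.1))
    remaining0

-- ===== PRECONDITION & SPEC =====
def Spec_filter_source_files_py (files : List (String × String)) (out : List (String × String)) : Prop := out = filter_source_files_py_alt files
instance (files : List (String × String)) (out : List (String × String)) : Decidable (Spec_filter_source_files_py files out) := by unfold Spec_filter_source_files_py; infer_instance

-- ===== CLAIM (what is proved, stated in full; the proofs are below) =====
def Claim_equal_filter_source_files_py : Prop := ∀ (files : List (String × String)), Dom_filter_source_files_py files → Spec_filter_source_files_py files (filter_source_files_py files)

-- ===== LEMMAS AND PROOFS =====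

-- the three-way per-pattern test, shared normal form for both proofs
def pvMatch (f p : String) : Bool :=
  if PySem.Str.endswith p "/" then PySem.Str.isIn (PySem.Str.slice p none (some (-1))) f
  else if PySem.Str.startswith p "*." then PySem.Str.endswith f (PySem.Str.slice p (some 1) none)
  else PySem.Str.isIn p f

-- A's break loop is 'any pattern matches'
lemma pvSkipA_eq_any (f : String) (ps : List String) :
    pvSkipA f ps = ps.any (pvMatch f) := by
  induction ps with
  | nil => rfl
  | cons p rest ih =>
    simp only [pvSkipA, List.any_cons, pvMatch]
    split_ifs <;> simp_all

-- B's per-pattern pass is one filter by ¬(this pattern matches)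
lemma pvPassB_eq_filter (rem : List (String × String)) (p : String) :
    (if PySem.Str.endswith p "/" then
        let needle := PySem.Str.slice p none (some (-1))
        rem.filter (fun fc => !PySem.Str.isIn needle fc.1)
      else if PySem.Str.startswith p "*." then
        let suffix := PySem.Str.slice p (some 1) none
        rem.filter (fun fc => !PySem.Str.endswith fc.1 suffix)
      else rem.filter (fun fc => !PySem.Str.isIn p fc.1))
    = rem.filter (fun fc => !pvMatch fc.1 p) := by
  simp only [pvMatch]
  split_ifs <;> rfl

-- successive removal passes = one filter by 'no pattern matches'
lemma foldl_filter_all (ps : List String) (xs : List (String × String)) :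
    ps.foldl (fun rem p => rem.filter (fun fc => !pvMatch fc.1 p)) xs
      = xs.filter (fun fc => ps.all (fun p => !pvMatch fc.1 p)) := by
  induction ps generalizing xs with
  | nil => simp
  | cons p rest ih =>
    simp only [List.foldl_cons, ih, List.filter_filter]
    apply List.filter_congr
    intro fc _
    simp [Bool.and_comm]

-- dropping an entry whose key the predicate rejects commutes with insert
lemma filter_items_insert_drop (keep : String → Bool) (k : String) (v : String)
    (hk : keep k = false) (e : PySem.Dict String String) :
    ((e.insert k v).items).filter (fun fc => keep fc.1)
      = e.items.filter (fun fc => keep fc.1) := by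
  unfold PySem.Dict.insert
  by_cases hc : e.contains k = true
  · simp only [hc, if_pos]
    rw [List.filter_map]
    have h1 : e.items.filter
        ((fun fc => keep fc.1) ∘ (fun p => if (p.1 == k) = true then (k, v) else p))
        = e.items.filter (fun fc => keep fc.1) := by
      apply List.filter_congr
      intro p _
      by_cases hpk : (p.1 == k) = true
      · simp [Function.comp, eq_of_beq hpk, hk]
      · simp [Function.comp, hpk]
    rw [h1]
    have h2 : (e.items.filter (fun fc => keep fc.1)).map
        (fun p => if (p.1 == k) = true then (k, v) else p)
        = (e.items.filter (fun fc => keep fc.1)).map id := by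
      apply List.map_congr_left
      intro p hp
      have hkeep : keep p.1 = true := (List.mem_filter.mp hp).2
      have hpk : (p.1 == k) = false := by
        by_cases h : (p.1 == k) = true
        · exact absurd hkeep (by rw [eq_of_beq h, hk]; simp)
        · simpa using h
      simp [hpk]
    rw [h2, List.map_id]
  · simp only [hc, if_neg, Bool.not_eq_true]
    simp [List.filter_append, hk]

-- a kept key: 'filter then insert' = 'insert then filter'
lemma insert_items_filter_keep (keep : String → Bool) (k : String) (v : String)
    (hk : keep k = true) (d e : PySem.Dict String String)
    (h : d.items = e.items.filter (fun fc => keep fc.1)) :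
    (d.insert k v).items = ((e.insert k v).items).filter (fun fc => keep fc.1) := by
  have hcontains : d.contains k = e.contains k := by
    unfold PySem.Dict.contains
    rw [h, List.any_filter]
    congr 1
    funext p
    by_cases hpk : (p.1 == k) = true
    · simp [eq_of_beq hpk, hk]
    · simp [hpk]
  unfold PySem.Dict.insert
  by_cases hc : e.contains k = true
  · simp only [hcontains, hc, if_pos]
    rw [List.filter_map]
    have h1 : e.items.filter
        ((fun fc => keep fc.1) ∘ (fun p => if (p.1 == k) = true then (k, v) else p))
        = e.items.filter (fun fc => keep fc.1) := by
      apply List.filter_congr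
      intro p _
      by_cases hpk : (p.1 == k) = true
      · simp [Function.comp, eq_of_beq hpk, hk]
      · simp [Function.comp, hpk]
    rw [h1, ← h]
  · have hc' : e.contains k = false := by simpa using hc
    simp only [hcontains, hc', Bool.false_eq_true, if_neg, not_false_iff]
    simp [List.filter_append, hk, h]

-- A's conditional-insert loop produces exactly the filtered items of the insert-all loop
lemma items_foldl_insert_keep (keep : String → Bool) (files : List (String × String))
    (d e : PySem.Dict String String)
    (h : d.items = e.items.filter (fun fc => keep fc.1)) :
    (files.foldl (fun d fc => if keep fc.1 then d.insert fc.1 fc.2 else d) d).items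
      = ((files.foldl (fun e fc => e.insert fc.1 fc.2) e).items).filter
          (fun fc => keep fc.1) := by
  induction files generalizing d e with
  | nil => simpa using h
  | cons fc rest ih =>
    simp only [List.foldl_cons]
    by_cases hk : keep fc.1
    · rw [if_pos hk]
      exact ih _ _ (insert_items_filter_keep keep fc.1 fc.2 hk d e h)
    · rw [if_neg hk]
      exact ih _ _ (by
        rw [h]
        exact (filter_items_insert_drop keep fc.1 fc.2 (by simpa using hk) e).symm)

-- ===== VERDICT (by name: the statement is the Claim_ definition above) =====
theorem filter_source_files_py_spec : Claim_equal_filter_source_files_py := by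
  intro files _
  unfold Spec_filter_source_files_py filter_source_files_py filter_source_files_py_alt
  have hA :
      (files.foldl
        (fun (filtered : PySem.Dict String String) fc =>
          if pvSkipA fc.1 pvExcludedPatterns then filtered else filtered.insert fc.1 fc.2)
        PySem.Dict.empty)
      = (files.foldl
          (fun (d : PySem.Dict String String) fc =>
            if (!pvSkipA fc.1 pvExcludedPatterns) then d.insert fc.1 fc.2 else d)
          PySem.Dict.empty) := by
    apply List.foldl_ext
    intro d fc _
    cases pvSkipA fc.1 pvExcludedPatterns <;> simp
  rw [hA, items_foldl_insert_keep (fun f => !pvSkipA f pvExcludedPatterns) files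
        PySem.Dict.empty PySem.Dict.empty rfl]
  have hB :
      pvExcludedPatterns.foldl
        (fun rem pattern =>
          if PySem.Str.endswith pattern "/" then
            let needle := PySem.Str.slice pattern none (some (-1))
            rem.filter (fun fc => !PySem.Str.isIn needle fc.1)
          else if PySem.Str.startswith pattern "*." then
            let suffix := PySem.Str.slice pattern (some 1) none
            rem.filter (fun fc => !PySem.Str.endswith fc.1 suffix)
          else rem.filter (fun fc => !PySem.Str.isIn pattern fc.1))
        ((files.foldl (fun (d : PySem.Dict String String) fc => d.insert fc.1 fc.2)
          PySem.Dict.empty).items)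
      = ((files.foldl (fun (d : PySem.Dict String String) fc => d.insert fc.1 fc.2)
          PySem.Dict.empty).items).filter
          (fun fc => pvExcludedPatterns.all (fun p => !pvMatch fc.1 p)) := by
    rw [← foldl_filter_all]
    apply List.foldl_ext
    intro rem p _
    exact pvPassB_eq_filter rem p
  rw [hB]
  apply List.filter_congr
  intro fc _
  rw [pvSkipA_eq_any, List.any_eq_not_all_not, Bool.not_not]
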